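-- pv_equiv track=rewrite | github.com/PedroMassaro/repo_intro_prog | Aula 12/ex06.py | find_longest_peptide
-- ===== SOURCE A (Python) =====
-- def find_longest_peptide(protein_seq):
--     peptides = protein_seq.split('*')
--     longest_peptide = ""
--     for pep in peptides:
--         if 'M' in pep:
--             pep = pep[pep.index('M'):]  # Obtém o trecho de M até antes de '*'
--             if len(pep) > len(longest_peptide):
--                 longest_peptide = pep
--     return longest_peptide
-- ===== SOURCE B (Python) =====
-- def find_longest_peptide(protein_seq):
--     # Single left-to-right scan: track the peptide currently being built
--     # (started at an 'M', cut off by '*') and the best seen so far.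
--     best = ""
--     cur = None
--     for ch in protein_seq:
--         if ch == '*':
--             cur = None
--         else:
--             if cur is None:
--                 if ch == 'M':
--                     cur = 'M'
--             else:
--                 cur = cur + ch
--             if cur is not None and len(cur) > len(best):
--                 best = cur
--     return best
-- ===== Notes on version B (the rewrite author's own statement) =====
-- stated objective: alternative
-- what changed: Replaced split('*') plus a per-segment 'M'-search/slice with a single character-by-character scan that maintains the currently growing peptide and the best one seen so far; no intermediate segment list, no index() or slicing.
import Mathlib
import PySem

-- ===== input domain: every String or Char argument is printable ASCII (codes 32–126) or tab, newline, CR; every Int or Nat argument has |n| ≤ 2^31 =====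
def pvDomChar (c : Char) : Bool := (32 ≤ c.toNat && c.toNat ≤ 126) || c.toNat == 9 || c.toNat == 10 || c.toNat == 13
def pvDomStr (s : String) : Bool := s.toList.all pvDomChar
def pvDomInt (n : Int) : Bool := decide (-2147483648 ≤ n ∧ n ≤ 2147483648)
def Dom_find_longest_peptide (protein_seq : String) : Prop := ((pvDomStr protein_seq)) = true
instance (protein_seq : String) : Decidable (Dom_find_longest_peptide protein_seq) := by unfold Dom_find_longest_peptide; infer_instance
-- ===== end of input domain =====

-- B replaces split('*')+per-segment M-search with one left-to-right scan keeping (best, current peptide); same O(n) cost, no segment list.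

-- ===== PORT A =====
-- protein_seq.split('*'); for pep: if 'M' in pep: pep = pep[pep.index('M'):]; keep if strictly longer
def find_longest_peptide (protein_seq : String) : String :=
  let peptides := PySem.Chars.splitOn protein_seq.toList ['*']
  String.ofList (peptides.foldl (fun longest pep =>
    if PySem.Chars.isIn ['M'] pep then
      let pep2 := PySem.Chars.slice pep (some (PySem.Chars.find pep ['M'])) none
      if longest.length < pep2.length then pep2 else longest
    else longest) [])

-- ===== PORT B =====
-- B's loop body: '*' resets cur; otherwise start at 'M' / extend, then update best if strictly longer
def pvStepB (st : List Char × Option (List Char)) (ch : Char) : List Char × Option (List Char) :=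
  if ch = '*' then (st.1, none)
  else
    let cur' : Option (List Char) :=
      match st.2 with
      | none => if ch = 'M' then some ['M'] else none
      | some cs => some (cs ++ [ch])
    match cur' with
    | none => (st.1, none)
    | some cs => (if st.1.length < cs.length then cs else st.1, some cs)

def find_longest_peptide_alt (protein_seq : String) : String :=
  String.ofList (protein_seq.toList.foldl pvStepB ([], none)).1

-- ===== PRECONDITION & SPEC =====
def Spec_find_longest_peptide (protein_seq : String) (out : String) : Prop := out = find_longest_peptide_alt protein_seq
instance (protein_seq : String) (out : String) : Decidable (Spec_find_longest_peptide protein_seq out) := by unfold Spec_find_longest_peptide; infer_instance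

-- ===== CLAIM (what is proved, stated in full; the proofs are below) =====
def Claim_equal_find_longest_peptide : Prop := ∀ (protein_seq : String), Dom_find_longest_peptide protein_seq → Spec_find_longest_peptide protein_seq (find_longest_peptide protein_seq)

-- ===== LEMMAS AND PROOFS =====

-- segments of l split on '*'
def pvSegs : List Char → List (List Char)
  | [] => [[]]
  | c :: r =>
    if c = '*' then [] :: pvSegs r
    else
      match pvSegs r with
      | [] => [[c]]
      | h :: t => (c :: h) :: t

def pvConsHead (p : List Char) : List (List Char) → List (List Char)
  | [] => [p]
  | h :: t => (p ++ h) :: t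

def pvUpd (b x : List Char) : List Char := if b.length < x.length then x else b

def pvG (b pep : List Char) : List Char :=
  if 'M' ∈ pep then pvUpd b (pep.drop (pep.idxOf 'M')) else b

def pvRun : List Char → Option (List Char) → List Char → List Char
  | best, _, [] => best
  | best, cur, c :: r =>
    if c = '*' then pvRun best none r
    else
      match cur with
      | none => if c = 'M' then pvRun (pvUpd best ['M']) (some ['M']) r else pvRun best none r
      | some cs => pvRun (pvUpd best (cs ++ [c])) (some (cs ++ [c])) r

theorem pvSegs_ne_nil (l : List Char) : pvSegs l ≠ [] := by
  cases l with
  | nil => simp [pvSegs]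
  | cons c r =>
    simp only [pvSegs]
    split
    · simp
    · split <;> simp

theorem pvConsHead_nil {ls : List (List Char)} (h : ls ≠ []) : pvConsHead [] ls = ls := by
  cases ls with
  | nil => exact absurd rfl h
  | cons a t => simp [pvConsHead]

theorem pv_go_eq : ∀ (fuel : Nat) (l cur : List Char) (acc : List (List Char)),
    l.length ≤ fuel →
    PySem.Chars.splitOn.go ['*'] fuel l cur acc = acc.reverse ++ pvConsHead cur.reverse (pvSegs l) := by
  intro fuel
  induction fuel with
  | zero =>
    intro l cur acc hl
    have : l = [] := by cases l <;> simp_all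
    subst this
    simp [PySem.Chars.splitOn.go, pvSegs, pvConsHead]
  | succ n ih =>
    intro l cur acc hl
    cases l with
    | nil => simp [PySem.Chars.splitOn.go, pvSegs, pvConsHead]
    | cons c rest =>
      rw [PySem.Chars.splitOn.go]
      by_cases hc : c = '*'
      · subst hc
        have hpre : List.isPrefixOf ['*'] ('*' :: rest) = true := by
          simp [List.isPrefixOf]
        simp only [hpre, if_true]
        rw [ih _ _ _ (by simpa using Nat.le_of_succ_le_succ hl)]
        rcases hseg : pvSegs rest with _ | ⟨h, t⟩
        · exact absurd hseg (pvSegs_ne_nil rest)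
        · simp [pvSegs, pvConsHead, hseg]
      · have hpre : List.isPrefixOf ['*'] (c :: rest) = false := by
          simp [List.isPrefixOf, Ne.symm hc]
        simp only [hpre, Bool.false_eq_true, if_false]
        rw [ih _ _ _ (by simpa using Nat.le_of_succ_le_succ hl)]
        simp only [pvSegs, hc, if_false]
        rcases hseg : pvSegs rest with _ | ⟨h, t⟩
        · exact absurd hseg (pvSegs_ne_nil rest)
        · simp [pvConsHead]
  
theorem pv_splitOn_eq (l : List Char) : PySem.Chars.splitOn l ['*'] = pvSegs l := by
  unfold PySem.Chars.splitOn
  rw [pv_go_eq _ _ _ _ (by omega)]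
  simpa using pvConsHead_nil (pvSegs_ne_nil l)

theorem pv_find_singleton : ∀ (l : List Char) (k : Nat),
    PySem.Chars.find.go ['M'] l k = if 'M' ∈ l then ((k + l.idxOf 'M' : Nat) : Int) else -1 := by
  intro l
  induction l with
  | nil => intro k; simp [PySem.Chars.find.go]
  | cons c t ih =>
    intro k
    rw [PySem.Chars.find.go]
    by_cases hc : c = 'M'
    · subst hc
      have : List.isPrefixOf ['M'] ('M' :: t) = true := by simp [List.isPrefixOf]
      simp [this, List.idxOf_cons_self]
    · have hpre : List.isPrefixOf ['M'] (c :: t) = false := by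
        simp only [List.isPrefixOf, Bool.and_true, beq_eq_false_iff_ne]
        exact Ne.symm hc
      simp only [hpre, Bool.false_eq_true, if_false]
      rw [ih (k + 1)]
      have hm : ('M' ∈ c :: t) ↔ ('M' ∈ t) := by simp [Ne.symm hc]
      by_cases h : 'M' ∈ t
      · simp [h, hm, List.idxOf_cons_ne _ (by simpa using hc)]
        push_cast
        omega
      · simp [h, hm]

-- bridge: A's loop body equals pvG
theorem pv_body_eq (b pep : List Char) :
    (if PySem.Chars.isIn ['M'] pep then
      let pep2 := PySem.Chars.slice pep (some (PySem.Chars.find pep ['M'])) none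
      if b.length < pep2.length then pep2 else b
    else b) = pvG b pep := by
  have hfind : PySem.Chars.find pep ['M'] = if 'M' ∈ pep then ((pep.idxOf 'M' : Nat) : Int) else -1 := by
    unfold PySem.Chars.find
    rw [pv_find_singleton]
    simp
  by_cases hm : 'M' ∈ pep
  · have hin : PySem.Chars.isIn ['M'] pep = true := by
      rw [PySem.Chars.isIn.eq_1, hfind]
      simp [hm]
    rw [hin, if_pos rfl]
    simp only [hfind, if_pos hm]
    show (if b.length < (PySem.List.slice pep (some ((pep.idxOf 'M' : Nat) : Int)) none).length then _ else _) = _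
    rw [PySem.List.slice_from_natCast]
    simp [pvG, hm, pvUpd]
  · have hin : PySem.Chars.isIn ['M'] pep = false := by
      rw [PySem.Chars.isIn.eq_1, hfind]
      simp [hm]
    simp [hin, pvG, hm]

theorem pv_foldB_eq_run : ∀ (l : List Char) (best : List Char) (cur : Option (List Char)),
    (l.foldl pvStepB (best, cur)).1 = pvRun best cur l := by
  intro l
  induction l with
  | nil => intro best cur; simp [pvRun]
  | cons c r ih =>
    intro best cur
    simp only [List.foldl_cons, pvRun]
    by_cases hc : c = '*'
    · simp [pvStepB, hc, ih]
    · cases cur with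
      | none =>
        by_cases hM : c = 'M'
        · simp [pvStepB, hM, ih, pvUpd]
        · simp [pvStepB, hc, hM, ih]
      | some cs => simp [pvStepB, hc, ih, pvUpd]

theorem pv_upd_len (b x : List Char) : x.length ≤ (pvUpd b x).length := by
  unfold pvUpd; split <;> omega

theorem pv_upd_collapse {b x y : List Char} (h : x = y ∨ x.length < y.length) :
    pvUpd (pvUpd b x) y = pvUpd b y := by
  unfold pvUpd
  rcases h with rfl | h
  · split <;> simp
  · by_cases h1 : b.length < x.length
    · simp [h1, h, Nat.lt_trans h1 h]
    · simp [h1]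

theorem pv_main : ∀ (l : List Char),
    (∀ best, pvRun best none l = (pvSegs l).foldl pvG best) ∧
    (∀ best cs h t, cs.length ≤ best.length → pvSegs l = h :: t →
      pvRun best (some cs) l = t.foldl pvG (pvUpd best (cs ++ h))) := by
  intro l
  induction l with
  | nil =>
    constructor
    · intro best; simp [pvRun, pvSegs, pvG]
    · intro best cs h t hlen hseg
      simp only [pvSegs] at hseg
      cases hseg
      simp [pvRun, pvUpd, Nat.not_lt.mpr hlen]
  | cons c r ih =>
    obtain ⟨ihP, ihQ⟩ := ih
    by_cases hc : c = '*'
    · subst hc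
      constructor
      · intro best
        simp only [pvRun, pvSegs]
        rw [ihP]
        simp [pvG]
      · intro best cs h t hlen hseg
        simp only [pvSegs, if_pos rfl] at hseg
        injection hseg with h1 h2
        subst h1; subst h2
        have hupd : pvUpd best (cs ++ []) = best := by
          unfold pvUpd; simp [Nat.not_lt.mpr hlen]
        simp only [pvRun, if_pos rfl]
        rw [hupd, ihP]
        simp
    · rcases hseg : pvSegs r with _ | ⟨h', t'⟩
      · exact absurd hseg (pvSegs_ne_nil r)
      constructor
      · intro best
        by_cases hM : c = 'M'
        · subst hM
          simp only [pvRun, if_neg hc]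
          rw [ihQ (pvUpd best ['M']) ['M'] h' t' (pv_upd_len best ['M']) hseg]
          rw [pv_upd_collapse (by cases h' <;> simp)]
          simp only [pvSegs, if_neg hc, hseg, List.foldl_cons]
          have : pvG best ('M' :: h') = pvUpd best ('M' :: h') := by
            simp [pvG, List.idxOf_cons_self]
          rw [this]
          simp
        · simp only [pvRun, if_neg hc, if_neg hM]
          rw [ihP]
          simp only [pvSegs, if_neg hc, hseg, List.foldl_cons]
          have : pvG best (c :: h') = pvG best h' := by
            unfold pvG
            have hmem : ('M' ∈ c :: h') ↔ ('M' ∈ h') := by simp [Ne.symm hM]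
            by_cases hm : 'M' ∈ h'
            · simp [hm, hmem, List.idxOf_cons_ne _ (by simpa using hM)]
            · simp [hm, hmem]
          rw [this]
      · intro best cs h t hlen hseg2
        simp only [pvSegs, if_neg hc, hseg] at hseg2
        injection hseg2 with h1 h2
        subst h1; subst h2
        simp only [pvRun, if_neg hc]
        rw [ihQ (pvUpd best (cs ++ [c])) (cs ++ [c]) h' t' (pv_upd_len best (cs ++ [c])) hseg]
        rw [pv_upd_collapse (by cases h' <;> simp)]
        simp

-- ===== VERDICT (by name: the statement is the Claim_ definition above) =====
theorem find_longest_peptide_spec : Claim_equal_find_longest_peptide := by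
  intro s _
  unfold Spec_find_longest_peptide find_longest_peptide find_longest_peptide_alt
  rw [pv_splitOn_eq, pv_foldB_eq_run, (pv_main s.toList).1]
  simp only [pv_body_eq]
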